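-- pv_equiv track=rewrite | github.com/soyukke/lean-unsolved | scripts/erdos89_optimization.py | best_rectangular_grid
-- ===== SOURCE A (Python) =====
-- from itertools import combinations
--
-- def dist_sq(p1, p2):
--     """2点間の距離の二乗"""
--     return (p1[0] - p2[0])**2 + (p1[1] - p2[1])**2
--
-- def count_distinct_distances_sq(points):
--     """異なる距離²の数を数える"""
--     dists = set()
--     for i, j in combinations(range(len(points)), 2):
--         dists.add(dist_sq(points[i], points[j]))
--     return len(dists)
--
-- def rectangular_grid(n, cols):
--     """cols 列の長方形格子から n 点を選ぶ"""
--     points = []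
--     for i in range(n):
--         points.append((i % cols, i // cols))
--     return points
--
-- def best_rectangular_grid(n):
--     """最適な列数の長方形格子を探す"""
--     best_d = float('inf')
--     best_cols = 1
--     best_pts = None
--     for cols in range(1, n + 1):
--         pts = rectangular_grid(n, cols)
--         d = count_distinct_distances_sq(pts)
--         if d < best_d:
--             best_d = d
--             best_cols = cols
--             best_pts = pts
--     return best_pts, best_d, best_cols
-- ===== SOURCE B (Python) =====
-- def best_rectangular_grid(n):
--     """Per column count, enumerate distinct displacement vectors (dx, dy) of the
--     grid directly (O(n) vectors per cols) instead of all O(n^2) point pairs."""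
--     def distinct_count(cols):
--         vals = [dx * dx + dy * dy
--                 for dy in range((n - 1) // cols + 1)
--                 for dx in range(-(cols - 1), cols)
--                 if dy * cols + dx >= 1 and dy * cols + max(dx, 0) < n]
--         return len(set(vals))
--
--     best_d, best_cols = min((distinct_count(c), c) for c in range(1, n + 1))
--     best_pts = [(i % best_cols, i // best_cols) for i in range(n)]
--     return best_pts, best_d, best_cols
-- ===== Notes on version B (the rewrite author's own statement) =====
-- stated objective: faster
-- what changed: Per column count, B enumerates the O(n) distinct displacement vectors (dx,dy) realisable in the partial grid (with a closed-form feasibility test) instead of A's O(n^2) all-pairs distance scan, and picks the best column count via a min over (count, cols) tuples; the point list is built once at the end.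
-- outside the precondition, e.g. on best_rectangular_grid(0): A returns (None, inf, 1), B raises ValueError
import Mathlib
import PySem

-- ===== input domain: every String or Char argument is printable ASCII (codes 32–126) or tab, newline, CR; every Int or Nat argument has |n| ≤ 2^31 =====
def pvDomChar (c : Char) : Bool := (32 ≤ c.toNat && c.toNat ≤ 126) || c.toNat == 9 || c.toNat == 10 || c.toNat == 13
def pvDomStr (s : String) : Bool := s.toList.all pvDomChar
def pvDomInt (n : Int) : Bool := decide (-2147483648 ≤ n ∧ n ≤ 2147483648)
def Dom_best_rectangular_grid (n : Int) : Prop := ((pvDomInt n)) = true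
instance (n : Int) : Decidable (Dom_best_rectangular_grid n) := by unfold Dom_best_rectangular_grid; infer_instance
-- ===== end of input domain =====

-- B enumerates the distinct displacement vectors of the grid per column count (O(n) per cols)
-- instead of all point pairs (O(n^2) per cols), and picks the best cols with a tuple-min; objective: faster.

-- ===== PORT A =====
def pv_dist_sq (p1 p2 : Int × Int) : Int := (p1.1 - p2.1)^2 + (p1.2 - p2.2)^2

def pv_count_distinct_distances_sq (points : List (Int × Int)) : Int :=
  -- itertools.combinations(range(len(points)), 2) ported by hand (lex order), exact
  let m : Int := (points.length : Int)
  let pairs := (PySem.List.pyRange 0 m 1).flatMap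
    (fun i => (PySem.List.pyRange (i+1) m 1).map (fun j => (i, j)))
  let dists := pairs.foldl
    (fun s ij => PySem.Set.add s
      (pv_dist_sq (PySem.List.pyGetD points ij.1 (0,0)) (PySem.List.pyGetD points ij.2 (0,0))))
    PySem.Set.empty
  (dists.length : Int)

def pv_rectangular_grid (n cols : Int) : List (Int × Int) :=
  (PySem.List.pyRange 0 n 1).map (fun i => (PySem.Int.mod i cols, PySem.Int.floordiv i cols))

-- loop body of A's 'for cols' loop; best_d = none models float('inf') (d < inf is always true)
def pv_stepA (n : Int) (st : Option (List (Int × Int)) × Option Int × Int) (cols : Int) :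
    Option (List (Int × Int)) × Option Int × Int :=
  let pts := pv_rectangular_grid n cols
  let d := pv_count_distinct_distances_sq pts
  let cond : Bool := match st.2.1 with | none => true | some bd => decide (d < bd)
  if cond then (some pts, some d, cols) else st

def best_rectangular_grid (n : Int) : (List (Int × Int)) × Int × Int :=
  let r := (PySem.List.pyRange 1 (n+1) 1).foldl (pv_stepA n) (none, none, 1)
  (r.1.getD [], r.2.1.getD 0, r.2.2)

-- ===== PORT B =====
def pv_alt_count (n cols : Int) : Int :=
  let vals := (PySem.List.pyRange 0 (PySem.Int.floordiv (n-1) cols + 1) 1).flatMap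
    (fun dy => ((PySem.List.pyRange (-(cols-1)) cols 1).filter
        (fun dx => decide (1 ≤ dy*cols + dx) && decide (dy*cols + max dx 0 < n))).map
      (fun dx => dx*dx + dy*dy))
  ((PySem.Set.ofList vals).length : Int)

def best_rectangular_grid_alt (n : Int) : (List (Int × Int)) × Int × Int :=
  match PySem.List.min2?
      ((PySem.List.pyRange 1 (n+1) 1).map (fun c => (pv_alt_count n c, c)))
      (fun p => p.1) (fun p => p.2) with
  | some (d, c) =>
      ((PySem.List.pyRange 0 n 1).map (fun i => (PySem.Int.mod i c, PySem.Int.floordiv i c)), d, c)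
  | none => ([], 0, 1)

-- ===== PRECONDITION & SPEC =====
-- Pre_ excludes n ≤ 0, where A's loop never runs and A returns (None, float('inf'), 1):
-- neither component is a value of the declared type (list, int).
def Pre_best_rectangular_grid (n : Int) : Prop := 1 ≤ n
instance (n : Int) : Decidable (Pre_best_rectangular_grid n) := by unfold Pre_best_rectangular_grid; infer_instance
def pvWitness_best_rectangular_grid : Int := 5

def Spec_best_rectangular_grid (n : Int) (out : (List (Int × Int)) × Int × Int) : Prop := out = best_rectangular_grid_alt n
instance (n : Int) (out : (List (Int × Int)) × Int × Int) : Decidable (Spec_best_rectangular_grid n out) := by unfold Spec_best_rectangular_grid; infer_instance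

-- ===== CLAIM (what is proved, stated in full; the proofs are below) =====
def Claim_equal_best_rectangular_grid : Prop := ∀ (n : Int), Dom_best_rectangular_grid n → Pre_best_rectangular_grid n → Spec_best_rectangular_grid n (best_rectangular_grid n)

-- ===== LEMMAS AND PROOFS =====

-- two Nodup lists with the same members have the same length
lemma pv_len_eq_of_mem_iff {l1 l2 : List Int} (h1 : l1.Nodup) (h2 : l2.Nodup)
    (h : ∀ v, v ∈ l1 ↔ v ∈ l2) : l1.length = l2.length :=
  (((List.perm_ext_iff_of_nodup h1 h2).mpr h)).length_eq

-- the pair-set of A and the displacement-set of B contain the same values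
lemma pv_pair_disp_iff (n c v : Int) (_hn : 0 ≤ n) (hc : 1 ≤ c) :
    (∃ i j : Int, 0 ≤ i ∧ i < j ∧ j < n ∧
      v = (PySem.Int.mod i c - PySem.Int.mod j c)^2 + (PySem.Int.floordiv i c - PySem.Int.floordiv j c)^2)
    ↔ (∃ dy dx : Int, 0 ≤ dy ∧ dy ≤ PySem.Int.floordiv (n-1) c ∧ -(c-1) ≤ dx ∧ dx < c ∧
      1 ≤ dy*c + dx ∧ dy*c + max dx 0 < n ∧ v = dx*dx + dy*dy) := by
  have hc0 : 0 < c := hc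
  have hcne : c ≠ 0 := by omega
  rw [PySem.Int.floordiv_eq_ediv_of_pos hc0]
  constructor
  · rintro ⟨i, j, hi, hij, hjn, hv⟩
    rw [PySem.Int.mod_eq_emod_of_pos hc0, PySem.Int.mod_eq_emod_of_pos hc0,
        PySem.Int.floordiv_eq_ediv_of_pos hc0, PySem.Int.floordiv_eq_ediv_of_pos hc0] at hv
    have hri0 : 0 ≤ i % c := Int.emod_nonneg i hcne
    have hric : i % c < c := Int.emod_lt_of_pos i hc0
    have hrj0 : 0 ≤ j % c := Int.emod_nonneg j hcne
    have hrjc : j % c < c := Int.emod_lt_of_pos j hc0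
    have hqi : c * (i / c) + i % c = i := Int.mul_ediv_add_emod i c
    have hqj : c * (j / c) + j % c = j := Int.mul_ediv_add_emod j c
    have hqi0 : 0 ≤ i / c := Int.ediv_nonneg hi (le_of_lt hc0)
    have hqle : i / c ≤ j / c := Int.ediv_le_ediv hc0 (le_of_lt hij)
    have hqn : j / c ≤ (n - 1) / c := Int.ediv_le_ediv hc0 (by omega)
    have hciq : 0 ≤ c * (i / c) := mul_nonneg (by omega) hqi0
    obtain ⟨t, ht⟩ : ∃ t, t = (j / c - i / c) * c := ⟨_, rfl⟩
    have hkey : t + (j % c - i % c) = j - i := by rw [ht]; linear_combination hqj - hqi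
    refine ⟨j / c - i / c, j % c - i % c, by omega, by omega, by omega, by omega,
      by rw [← ht]; omega, ?_, by rw [hv]; ring⟩
    rw [← ht]
    rcases le_total (j % c - i % c) 0 with hneg | hpos
    · rw [max_eq_right hneg]; omega
    · rw [max_eq_left hpos]; omega
  · rintro ⟨dy, dx, hdy0, hdyn, hdx0, hdx1, h1, h2, hv⟩
    have hcomm : dy * c = c * dy := mul_comm dy c
    -- i := max 0 (-dx); j := dy*c + max dx 0 = (i + dx) + c*dy
    rcases le_total 0 dx with hd | hd
    · -- dx ≥ 0 : i = 0, j = dx + c*dy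
      rw [max_eq_left hd] at h2
      refine ⟨0, dx + c * dy, le_rfl, by omega, by omega, ?_⟩
      rw [PySem.Int.mod_eq_emod_of_pos hc0, PySem.Int.mod_eq_emod_of_pos hc0,
          PySem.Int.floordiv_eq_ediv_of_pos hc0, PySem.Int.floordiv_eq_ediv_of_pos hc0,
          Int.add_mul_emod_self_left, Int.add_mul_ediv_left dx dy hcne,
          Int.emod_eq_of_lt hd hdx1, Int.ediv_eq_zero_of_lt hd hdx1]
      simp only [Int.zero_emod, Int.zero_ediv]
      rw [hv]; ring
    · -- dx < 0 : i = -dx, j = c*dy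
      rw [max_eq_right hd] at h2
      refine ⟨-dx, 0 + c * dy, by omega, by omega, by omega, ?_⟩
      rw [PySem.Int.mod_eq_emod_of_pos hc0, PySem.Int.mod_eq_emod_of_pos hc0,
          PySem.Int.floordiv_eq_ediv_of_pos hc0, PySem.Int.floordiv_eq_ediv_of_pos hc0,
          Int.add_mul_emod_self_left, Int.add_mul_ediv_left 0 dy hcne,
          Int.emod_eq_of_lt (by omega) (by omega), Int.emod_eq_of_lt le_rfl hc0,
          Int.ediv_eq_zero_of_lt (by omega) (by omega), Int.ediv_eq_zero_of_lt le_rfl hc0]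
      rw [hv]; ring

lemma pv_count_eq (n c : Int) (hn : 0 ≤ n) (hc : 1 ≤ c) :
    pv_count_distinct_distances_sq (pv_rectangular_grid n c) = pv_alt_count n c := by
  have hlen : ((pv_rectangular_grid n c).length : Int) = n := by
    simp [pv_rectangular_grid, PySem.List.length_pyRange_one]
    omega
  simp only [pv_count_distinct_distances_sq, pv_alt_count, hlen]
  rw [← PySem.Set.update_map_eq_foldl_add, PySem.Set.update_empty]
  congr 1
  apply pv_len_eq_of_mem_iff (PySem.Set.nodup_ofList _) (PySem.Set.nodup_ofList _)
  intro v
  rw [PySem.Set.mem_ofList, PySem.Set.mem_ofList]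
  have hget : ∀ i : Int, 0 ≤ i → i < n →
      PySem.List.pyGetD (pv_rectangular_grid n c) i (0,0) = (PySem.Int.mod i c, PySem.Int.floordiv i c) := by
    intro i h0 h1
    exact PySem.List.pyGetD_map_pyRange_of_nonneg _ n i _ h0 h1
  constructor
  · intro hv
    simp only [List.mem_map, List.mem_flatMap, PySem.List.mem_pyRange_one] at hv
    obtain ⟨⟨i, j⟩, ⟨⟨i', ⟨⟨h0, h1⟩, hj⟩⟩, hg⟩⟩ := hv
    obtain ⟨j', ⟨hj1, hj2⟩, heq⟩ := hj
    injection heq with e1 e2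
    rw [e1] at h0 h1
    rw [e1, e2] at hj1
    rw [e2] at hj2
    rw [hget i h0 h1, hget j (by omega) hj2] at hg
    have hv2 : v = (PySem.Int.mod i c - PySem.Int.mod j c)^2 + (PySem.Int.floordiv i c - PySem.Int.floordiv j c)^2 := by
      rw [← hg]; simp [pv_dist_sq]
    obtain ⟨dy, dx, hdy0, hdy1, hdx0, hdx1, hge1, hltn, hveq⟩ :=
      (pv_pair_disp_iff n c v hn hc).mp ⟨i, j, h0, by omega, hj2, hv2⟩
    simp only [List.mem_flatMap, List.mem_map, List.mem_filter, PySem.List.mem_pyRange_one]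
    exact ⟨dy, ⟨hdy0, by omega⟩, dx, ⟨⟨hdx0, hdx1⟩, by simp [hge1, hltn]⟩, hveq.symm⟩
  · intro hv
    simp only [List.mem_map, List.mem_flatMap, List.mem_filter, PySem.List.mem_pyRange_one] at hv
    obtain ⟨dy, ⟨hdy0, hdy1⟩, dx, ⟨⟨hdx0, hdx1⟩, hcond⟩, hval⟩ := hv
    rw [Bool.and_eq_true, decide_eq_true_eq, decide_eq_true_eq] at hcond
    obtain ⟨i, j, h0, hij, hjn, hveq⟩ := (pv_pair_disp_iff n c v hn hc).mpr
      ⟨dy, dx, hdy0, by omega, hdx0, hdx1, hcond.1, hcond.2, hval.symm⟩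
    simp only [List.mem_map, List.mem_flatMap, PySem.List.mem_pyRange_one]
    refine ⟨(i, j), ⟨i, ⟨h0, by omega⟩, j, ⟨by omega, hjn⟩, rfl⟩, ?_⟩
    rw [hget i h0 (by omega), hget j (by omega) hjn]
    simpa [pv_dist_sq] using hveq.symm

-- B's selection loop body (min over (count, cols) tuples), as a fold step
def pvStep2 (f : Int → Int) (acc : Option (Int × Int)) (c : Int) : Option (Int × Int) :=
  match acc with
  | none => some (f c, c)
  | some m => if (decide (f c < m.1) || (!decide (m.1 < f c) && decide (c < m.2))) then some (f c, c) else acc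

lemma pv_min2_eq_foldl (f : Int → Int) (l : List Int) :
    PySem.List.min2? (l.map (fun c => (f c, c))) (fun p => p.1) (fun p => p.2)
      = l.foldl (pvStep2 f) none := by
  simp only [PySem.List.min2?, List.foldl_map]
  congr 1
  funext acc c
  cases acc <;> simp [pvStep2]

lemma pv_step2_some (f : Int → Int) (l : List Int) (m : Int × Int) :
    ∃ m', l.foldl (pvStep2 f) (some m) = some m' := by
  induction l generalizing m with
  | nil => exact ⟨m, rfl⟩
  | cons c t ih =>
    simp only [List.foldl_cons, pvStep2]
    split
    · exact ih _
    · exact ih _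

-- the two selection loops agree (cols strictly increasing, so the tuple tie-break never fires)
lemma pv_sel_loop (n : Int) : ∀ (l : List Int) (bd bc : Int),
    l.Pairwise (· < ·) → (∀ x ∈ l, bc < x) →
    (∀ x ∈ l, pv_count_distinct_distances_sq (pv_rectangular_grid n x) = pv_alt_count n x) →
    l.foldl (pv_stepA n) (some (pv_rectangular_grid n bc), some bd, bc)
      = (match l.foldl (pvStep2 (pv_alt_count n)) (some (bd, bc)) with
         | some m => (some (pv_rectangular_grid n m.2), some m.1, m.2)
         | none => (none, none, 0)) := by
  intro l
  induction l with
  | nil => intro bd bc _ _ _; rfl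
  | cons c t ih =>
    intro bd bc hp hlt hf
    have hc : pv_count_distinct_distances_sq (pv_rectangular_grid n c) = pv_alt_count n c :=
      hf c (by simp)
    have hbc : bc < c := hlt c (by simp)
    have hp' : t.Pairwise (· < ·) := (List.pairwise_cons.mp hp).2
    have hcx : ∀ x ∈ t, c < x := (List.pairwise_cons.mp hp).1
    have hbx : ∀ x ∈ t, bc < x := fun x hx => hlt x (by simp [hx])
    have hf' : ∀ x ∈ t, pv_count_distinct_distances_sq (pv_rectangular_grid n x) = pv_alt_count n x :=
      fun x hx => hf x (by simp [hx])
    simp only [List.foldl_cons]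
    by_cases hlt2 : pv_alt_count n c < bd
    · have hA : pv_stepA n (some (pv_rectangular_grid n bc), some bd, bc) c
          = (some (pv_rectangular_grid n c), some (pv_alt_count n c), c) := by
        simp [pv_stepA, hc, hlt2]
      have hB : pvStep2 (pv_alt_count n) (some (bd, bc)) c = some (pv_alt_count n c, c) := by
        simp [pvStep2, hlt2]
      rw [hA, hB, ih _ _ hp' hcx hf']
    · have hA : pv_stepA n (some (pv_rectangular_grid n bc), some bd, bc) c
          = (some (pv_rectangular_grid n bc), some bd, bc) := by
        simp [pv_stepA, hc, hlt2]
      have hB : pvStep2 (pv_alt_count n) (some (bd, bc)) c = some (bd, bc) := by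
        simp [pvStep2, hlt2]
        omega
      rw [hA, hB, ih _ _ hp' hbx hf']

-- ===== VERDICT (by name: the statement is the Claim_ definition above) =====
theorem best_rectangular_grid_spec : Claim_equal_best_rectangular_grid := by
  intro n _ hP
  have hn1 : 1 ≤ n := hP
  unfold Spec_best_rectangular_grid best_rectangular_grid best_rectangular_grid_alt
  rw [PySem.List.pyRange_one_cons (by omega : (1:Int) < n + 1)]
  rw [pv_min2_eq_foldl]
  simp only [List.foldl_cons]
  have h1 : pv_stepA n (none, none, 1) 1
      = (some (pv_rectangular_grid n 1), some (pv_alt_count n 1), 1) := by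
    simp [pv_stepA, pv_count_eq n 1 (by omega) le_rfl]
  have h2 : pvStep2 (pv_alt_count n) none 1 = some (pv_alt_count n 1, 1) := rfl
  rw [h1, h2]
  simp only [show (1:Int)+1 = 2 from rfl]
  rw [pv_sel_loop n _ (pv_alt_count n 1) 1
    (PySem.List.pairwise_lt_pyRange_one 2 (n+1))
    (fun x hx => by have := (PySem.List.mem_pyRange_one).mp hx; omega)
    (fun x hx => by
      have := (PySem.List.mem_pyRange_one).mp hx
      exact pv_count_eq n x (by omega) (by omega))]
  obtain ⟨m', hm⟩ := pv_step2_some (pv_alt_count n) (PySem.List.pyRange 2 (n+1) 1) (pv_alt_count n 1, 1)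
  obtain ⟨d', c'⟩ := m'
  rw [hm]
  simp [pv_rectangular_grid]
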